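-- pv_equiv track=rewrite | github.com/KKoovalsky/dotfiles | vim/pythonx/unity_tests_helpers.py | find_line_that_contains_reverse_search_from_line
-- ===== SOURCE A (Python) =====
-- class MatchNotFoundError(Exception):
--     pass
--
-- def find_line_that_contains_reverse_search_from_line(
--         lines, matcher, line_begin):
--     first_line_nr = 1
--     lines_range = lines[:line_begin]
--     try:
--         return next(i for i, v in reversed(list(enumerate(
--             lines_range, first_line_nr))) if matcher in v)
--     except StopIteration:
--         raise MatchNotFoundError
-- ===== SOURCE B (Python) =====
-- class MatchNotFoundError(Exception):
--     pass
--
-- def find_line_that_contains_reverse_search_from_line(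
--         lines, matcher, line_begin):
--     last_match = None
--     nr = 0
--     for line in lines[:line_begin]:
--         nr += 1
--         if matcher in line:
--             last_match = nr
--     if last_match is None:
--         raise MatchNotFoundError
--     return last_match
-- ===== Notes on version B (the rewrite author's own statement) =====
-- stated objective: alternative
-- what changed: Replaces the reversed-enumerate generator with early exit by a single forward loop that keeps overwriting a last-match accumulator and returns it after the loop.
import Mathlib
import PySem

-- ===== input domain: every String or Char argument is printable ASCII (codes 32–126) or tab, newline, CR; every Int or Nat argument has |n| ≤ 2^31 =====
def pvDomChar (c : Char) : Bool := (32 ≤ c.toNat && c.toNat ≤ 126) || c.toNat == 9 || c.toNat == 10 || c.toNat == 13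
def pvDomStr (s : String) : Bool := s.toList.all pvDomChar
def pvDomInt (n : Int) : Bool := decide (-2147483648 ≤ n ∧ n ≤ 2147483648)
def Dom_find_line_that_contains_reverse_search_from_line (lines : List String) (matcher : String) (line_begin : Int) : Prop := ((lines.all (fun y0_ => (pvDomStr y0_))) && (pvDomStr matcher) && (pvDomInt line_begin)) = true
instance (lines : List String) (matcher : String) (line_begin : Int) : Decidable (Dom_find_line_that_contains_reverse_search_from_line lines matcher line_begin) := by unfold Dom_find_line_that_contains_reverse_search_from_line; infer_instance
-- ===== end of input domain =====

-- B replaces A's reversed-enumerate early-exit scan by a forward pass with a last-match accumulator (alternative decomposition, same cost).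

-- ===== PORT A =====
-- the 'next(... for i, v in <pairs> if matcher in v)' generator; none = StopIteration
def pvNextMatch (matcher : String) : List (Int × String) → Option Int
  | [] => none
  | (i, v) :: rest => if PySem.Str.isIn matcher v then some i else pvNextMatch matcher rest

def find_line_that_contains_reverse_search_from_line (lines : List String) (matcher : String) (line_begin : Int) : Int :=
  let lines_range := PySem.List.slice lines none (some line_begin)
  match pvNextMatch matcher (PySem.List.enumerate lines_range 1).reverse with
  | some i => i
  | none => 0   -- MatchNotFoundError: excluded by Pre_

-- ===== PORT B =====
def find_line_that_contains_reverse_search_from_line_alt (lines : List String) (matcher : String) (line_begin : Int) : Int :=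
  let st := (PySem.List.slice lines none (some line_begin)).foldl
    (fun (p : Option Int × Int) line =>
      let nr := p.2 + 1
      (if PySem.Str.isIn matcher line then some nr else p.1, nr))
    (none, 0)
  match st.1 with
  | some i => i
  | none => 0   -- MatchNotFoundError: excluded by Pre_

-- ===== PRECONDITION & SPEC =====
-- Pre_ excludes exactly the inputs where no line of lines[:line_begin] contains matcher:
-- there A raises MatchNotFoundError (and B raises the same), so no value is returned.
def Pre_find_line_that_contains_reverse_search_from_line (lines : List String) (matcher : String) (line_begin : Int) : Prop :=
  (PySem.List.slice lines none (some line_begin)).any (fun l => PySem.Str.isIn matcher l) = true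
instance (lines : List String) (matcher : String) (line_begin : Int) : Decidable (Pre_find_line_that_contains_reverse_search_from_line lines matcher line_begin) := by unfold Pre_find_line_that_contains_reverse_search_from_line; infer_instance

def pvWitness_find_line_that_contains_reverse_search_from_line : List String × String × Int := (["foo"], "o", 1)

def Spec_find_line_that_contains_reverse_search_from_line (lines : List String) (matcher : String) (line_begin : Int) (out : Int) : Prop := out = find_line_that_contains_reverse_search_from_line_alt lines matcher line_begin
instance (lines : List String) (matcher : String) (line_begin : Int) (out : Int) : Decidable (Spec_find_line_that_contains_reverse_search_from_line lines matcher line_begin out) := by unfold Spec_find_line_that_contains_reverse_search_from_line; infer_instance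

-- ===== CLAIM (what is proved, stated in full; the proofs are below) =====
def Claim_equal_find_line_that_contains_reverse_search_from_line : Prop := ∀ (lines : List String) (matcher : String) (line_begin : Int), Dom_find_line_that_contains_reverse_search_from_line lines matcher line_begin → Pre_find_line_that_contains_reverse_search_from_line lines matcher line_begin → Spec_find_line_that_contains_reverse_search_from_line lines matcher line_begin (find_line_that_contains_reverse_search_from_line lines matcher line_begin)

-- ===== LEMMAS AND PROOFS =====

theorem pvNextMatch_append (matcher : String) (l₁ l₂ : List (Int × String)) :
    pvNextMatch matcher (l₁ ++ l₂)
      = ((pvNextMatch matcher l₁).orElse (fun _ => pvNextMatch matcher l₂)) := by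
  induction l₁ with
  | nil => rfl
  | cons p rest ih =>
    obtain ⟨i, v⟩ := p
    simp only [List.cons_append, pvNextMatch]
    split <;> simp [ih]

-- the forward fold computes (last match ∨ previous accumulator, updated counter)
theorem pvFold_eq (matcher : String) (r : List String) (a : Option Int) (c : Int) :
    r.foldl (fun (p : Option Int × Int) line =>
        let nr := p.2 + 1
        (if PySem.Str.isIn matcher line then some nr else p.1, nr)) (a, c)
      = ((pvNextMatch matcher (PySem.List.enumerate r (c + 1)).reverse).orElse (fun _ => a),
         c + r.length) := by
  induction r generalizing a c with
  | nil => simp [PySem.List.enumerate, pvNextMatch]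
  | cons x rest ih =>
    simp only [List.foldl_cons, PySem.List.enumerate_cons, List.reverse_cons,
      pvNextMatch_append, ih]
    have h2 : c + 1 + 1 = c + 2 := by ring
    rw [h2]
    refine Prod.ext ?_ ?_
    · cases hin : pvNextMatch matcher (PySem.List.enumerate rest (c + 2)).reverse with
      | some i => simp [Option.orElse]
      | none => simp only [Option.orElse, pvNextMatch]; split <;> rfl
    · simp; ring

theorem pvNextMatch_none_all (matcher : String) (r : List String) (c : Int)
    (h : pvNextMatch matcher (PySem.List.enumerate r (c + 1)).reverse = none) :
    ∀ x ∈ r, PySem.Str.isIn matcher x = false := by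
  induction r generalizing c with
  | nil => simp
  | cons x rest ih =>
    simp only [PySem.List.enumerate_cons, List.reverse_cons, pvNextMatch_append] at h
    have h2 : c + 1 + 1 = c + 2 := by ring
    rw [h2] at h
    cases h₁ : pvNextMatch matcher (PySem.List.enumerate rest (c + 2)).reverse with
    | some i => rw [h₁] at h; simp [Option.orElse] at h
    | none =>
      rw [h₁] at h
      simp only [Option.orElse] at h
      intro y hy
      rcases List.mem_cons.mp hy with rfl | hy'
      · by_cases hm : PySem.Str.isIn matcher y = true
        · simp [pvNextMatch] at h
          simp [PySem.Str.isIn, h] at hm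
        · exact eq_false_of_ne_true hm
      · exact ih (c + 1) (by rw [show c + 1 + 1 = c + 2 by ring]; exact h₁) y hy'

-- ===== VERDICT (by name: the statement is the Claim_ definition above) =====
theorem find_line_that_contains_reverse_search_from_line_spec : Claim_equal_find_line_that_contains_reverse_search_from_line := by
  intro lines matcher line_begin _hdom hpre
  unfold Spec_find_line_that_contains_reverse_search_from_line
  unfold find_line_that_contains_reverse_search_from_line
    find_line_that_contains_reverse_search_from_line_alt
  set r := PySem.List.slice lines none (some line_begin) with hr
  have hfold := pvFold_eq matcher r none 0
  simp only [zero_add] at hfold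
  rw [hfold]
  cases h : pvNextMatch matcher (PySem.List.enumerate r 1).reverse with
  | none =>
    exfalso
    have hall := pvNextMatch_none_all matcher r 0 (by simpa using h)
    unfold Pre_find_line_that_contains_reverse_search_from_line at hpre
    rw [List.any_eq_true] at hpre
    obtain ⟨x, hx, hxm⟩ := hpre
    rw [hall x hx] at hxm
    exact absurd hxm (by simp)
  | some i => simp [h]
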